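-- pv_equiv track=rewrite | github.com/Schteeven/kinotify | kinotify.py | choose_films_to_see
-- ===== SOURCE A (Python) =====
-- def choose_films_to_see(watchlist, in_cinemas):
--     to_see_in_cinemas = []
--
--     for cinema, schedule in in_cinemas:
--         to_see_in_cinemas.append("\n\n")
--         to_see_in_cinemas.append(cinema)
--         to_see_in_cinemas.append(":")
--
--         last_date = ""
--
--         for date, name, time in schedule:
--             if name in watchlist:
--                 if date != last_date:
--                     last_date = date
--                     to_see_in_cinemas.append("\n")
--                     to_see_in_cinemas.append(last_date)
--                     to_see_in_cinemas.append(":\n")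
--                 to_see_in_cinemas.append("    ")
--                 to_see_in_cinemas.append(time)
--                 to_see_in_cinemas.append("  ")
--                 to_see_in_cinemas.append(name)
--                 to_see_in_cinemas.append("\n")
--     return to_see_in_cinemas
-- ===== SOURCE B (Python) =====
-- def _groups(rows):
--     """Group consecutive rows sharing the same date: list of (date, run)."""
--     gs = []
--     i = 0
--     n = len(rows)
--     while i < n:
--         d = rows[i][0]
--         j = i + 1
--         while j < n and rows[j][0] == d:
--             j += 1
--         gs.append((d, rows[i:j]))
--         i = j
--     return gs
--
--
-- def choose_films_to_see(watchlist, in_cinemas):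
--     out = []
--     for cinema, schedule in in_cinemas:
--         out += ["\n\n", cinema, ":"]
--         prev = ""
--         for date, run in _groups([r for r in schedule if r[1] in watchlist]):
--             if date != prev:
--                 out += ["\n", date, ":\n"]
--             prev = date
--             for _, name, time in run:
--                 out += ["    ", time, "  ", name, "\n"]
--     return out
-- ===== Notes on version B (the rewrite author's own statement) =====
-- stated objective: alternative
-- what changed: Replaces A's single interleaved loop with running last_date state by a three-stage pipeline per cinema: filter the schedule by watchlist, group consecutive equal dates into runs, then emit one header per run (suppressed when equal to the previous run's date, starting from the empty string).
import Mathlib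
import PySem

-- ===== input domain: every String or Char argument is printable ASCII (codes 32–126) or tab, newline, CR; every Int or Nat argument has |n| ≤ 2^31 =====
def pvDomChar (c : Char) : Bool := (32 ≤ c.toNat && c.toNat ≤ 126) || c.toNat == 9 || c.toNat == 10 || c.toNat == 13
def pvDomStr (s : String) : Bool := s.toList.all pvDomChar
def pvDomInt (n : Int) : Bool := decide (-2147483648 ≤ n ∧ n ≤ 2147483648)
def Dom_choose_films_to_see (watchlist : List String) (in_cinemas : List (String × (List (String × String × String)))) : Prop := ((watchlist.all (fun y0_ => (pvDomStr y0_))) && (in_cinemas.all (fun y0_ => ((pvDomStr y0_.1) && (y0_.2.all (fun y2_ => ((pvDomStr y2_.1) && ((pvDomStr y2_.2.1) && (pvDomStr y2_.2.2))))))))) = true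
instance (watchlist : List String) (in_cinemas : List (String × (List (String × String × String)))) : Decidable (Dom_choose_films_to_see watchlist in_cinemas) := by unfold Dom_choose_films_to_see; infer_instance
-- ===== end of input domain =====

-- B restructures A's single interleaved loop into a filter / group-consecutive-dates / emit pipeline per cinema (objective: alternative decomposition; return values identical).
-- ===== PORT A =====
-- inner for-loop over the schedule: state = (last_date, accumulated output)
def pvALoop (watchlist : List String) (last : String) (acc : List String) : List (String × String × String) → List String
  | [] => acc
  | row :: rest =>
    if watchlist.contains row.2.1 then
      if row.1 ≠ last then
        pvALoop watchlist row.1 (acc ++ ["\n", row.1, ":\n", "    ", row.2.2, "  ", row.2.1, "\n"]) rest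
      else
        pvALoop watchlist last (acc ++ ["    ", row.2.2, "  ", row.2.1, "\n"]) rest
    else
      pvALoop watchlist last acc rest

-- outer for-loop over (cinema, schedule)
def pvAOuter (watchlist : List String) (acc : List String) : List (String × (List (String × String × String))) → List String
  | [] => acc
  | ci :: rest => pvAOuter watchlist (pvALoop watchlist "" (acc ++ ["\n\n", ci.1, ":"]) ci.2) rest

def choose_films_to_see (watchlist : List String) (in_cinemas : List (String × (List (String × String × String)))) : List String :=
  pvAOuter watchlist [] in_cinemas

-- ===== PORT B =====
-- Source B's _groups: group consecutive rows with the same date (outer while advances by one run)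
def pvBGroups : List (String × String × String) → List (String × List (String × String × String))
  | [] => []
  | r :: rs =>
    (r.1, r :: rs.takeWhile (fun x => x.1 == r.1)) :: pvBGroups (rs.dropWhile (fun x => x.1 == r.1))
termination_by l => l.length
decreasing_by
  exact Nat.lt_succ_of_le (List.length_dropWhile_le _ _)

-- innermost for-loop: one output line per row of a run
def pvBRows (g : List (String × String × String)) : List String :=
  g.flatMap (fun r => ["    ", r.2.2, "  ", r.2.1, "\n"])

-- middle for-loop over the runs, with the prev header-suppression state
def pvBEmit (prev : String) : List (String × List (String × String × String)) → List String
  | [] => []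
  | g :: t => (if g.1 ≠ prev then ["\n", g.1, ":\n"] else []) ++ pvBRows g.2 ++ pvBEmit g.1 t

def pvBCinema (watchlist : List String) (ci : String × (List (String × String × String))) : List String :=
  ["\n\n", ci.1, ":"] ++ pvBEmit "" (pvBGroups (ci.2.filter (fun r => watchlist.contains r.2.1)))

def choose_films_to_see_alt (watchlist : List String) (in_cinemas : List (String × (List (String × String × String)))) : List String :=
  in_cinemas.flatMap (pvBCinema watchlist)

-- ===== PRECONDITION & SPEC =====
def Spec_choose_films_to_see (watchlist : List String) (in_cinemas : List (String × (List (String × String × String)))) (out : List String) : Prop := out = choose_films_to_see_alt watchlist in_cinemas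
instance (watchlist : List String) (in_cinemas : List (String × (List (String × String × String)))) (out : List String) : Decidable (Spec_choose_films_to_see watchlist in_cinemas out) := by unfold Spec_choose_films_to_see; infer_instance

-- ===== CLAIM (what is proved, stated in full; the proofs are below) =====
def Claim_equal_choose_films_to_see : Prop := ∀ (watchlist : List String) (in_cinemas : List (String × (List (String × String × String)))), Dom_choose_films_to_see watchlist in_cinemas → Spec_choose_films_to_see watchlist in_cinemas (choose_films_to_see watchlist in_cinemas)

-- ===== LEMMAS AND PROOFS =====

-- A's inner loop equals: filter, group consecutive dates, emit with header suppression.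
theorem pvALoop_eq (watchlist : List String) (rs : List (String × String × String)) :
    ∀ (last : String) (acc : List String),
      pvALoop watchlist last acc rs
        = acc ++ pvBEmit last (pvBGroups (rs.filter (fun r => watchlist.contains r.2.1))) := by
  induction rs with
  | nil => intro last acc; simp [pvALoop, pvBGroups, pvBEmit]
  | cons r rs ih =>
    intro last acc
    by_cases hc : watchlist.contains r.2.1 = true
    · rw [List.filter_cons_of_pos (p := fun y : String × String × String => watchlist.contains y.2.1) hc]
      cases hl : rs.filter (fun r => watchlist.contains r.2.1) with
      | nil =>
        by_cases hd : r.1 = last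
        · subst hd
          rw [pvALoop, if_pos hc, if_neg (not_not_intro rfl), ih, hl]
          simp [pvBGroups, pvBEmit, pvBRows]
        · rw [pvALoop, if_pos hc, if_pos hd, ih, hl]
          simp [pvBGroups, pvBEmit, pvBRows, hd]
      | cons x l' =>
        by_cases hx : x.1 = r.1
        · have htw : (x :: l').takeWhile (fun y => y.1 == r.1)
              = x :: l'.takeWhile (fun y => y.1 == r.1) := by
            simp [hx]
          have hdw : (x :: l').dropWhile (fun y => y.1 == r.1)
              = l'.dropWhile (fun y => y.1 == r.1) := by
            simp [hx]
          by_cases hd : r.1 = last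
          · subst hd
            rw [pvALoop, if_pos hc, if_neg (not_not_intro rfl), ih, hl]
            simp [pvBGroups, pvBEmit, pvBRows, htw, hdw, hx]
          · rw [pvALoop, if_pos hc, if_pos hd, ih, hl]
            simp [pvBGroups, pvBEmit, pvBRows, htw, hdw, hx, hd]
        · have htw : (x :: l').takeWhile (fun y => y.1 == r.1) = [] := by
            simp [hx]
          have hdw : (x :: l').dropWhile (fun y => y.1 == r.1) = x :: l' := by
            simp [hx]
          by_cases hd : r.1 = last
          · subst hd
            rw [pvALoop, if_pos hc, if_neg (not_not_intro rfl), ih, hl]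
            simp [pvBGroups, pvBEmit, pvBRows, htw, hdw]
          · rw [pvALoop, if_pos hc, if_pos hd, ih, hl]
            simp [pvBGroups, pvBEmit, pvBRows, htw, hdw, hd]
    · rw [List.filter_cons_of_neg (p := fun y : String × String × String => watchlist.contains y.2.1) hc, pvALoop, if_neg hc]
      exact ih last acc

theorem pvAOuter_eq (watchlist : List String) (ic : List (String × (List (String × String × String)))) :
    ∀ (acc : List String),
      pvAOuter watchlist acc ic = acc ++ ic.flatMap (pvBCinema watchlist) := by
  induction ic with
  | nil => intro acc; simp [pvAOuter]
  | cons ci rest ih =>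
    intro acc
    rw [pvAOuter, pvALoop_eq, ih]
    simp [pvBCinema]

-- ===== VERDICT (by name: the statement is the Claim_ definition above) =====
theorem choose_films_to_see_spec : Claim_equal_choose_films_to_see := by
  intro watchlist in_cinemas _
  unfold Spec_choose_films_to_see choose_films_to_see choose_films_to_see_alt
  simpa using pvAOuter_eq watchlist in_cinemas []
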